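-- pv_equiv track=rewrite | github.com/mcindoe/adventofcode | year2023/day03/question_2.py | get_part_number_locations_on_line
-- ===== SOURCE A (Python) =====
-- def get_number_locations_in_line(schematic_line: str) -> list[tuple[int, int]]:
--     """
--     Return the first (inclusive) and last index (exclusive) of all numbers
--     in the schematic
--     """
--
--     number_locations = []
--
--     in_number = False
--     number_start = None
--
--     for char_idx, char in enumerate(schematic_line):
--         if char.isnumeric():
--             if not in_number:
--                 number_start = char_idx
--                 in_number = True
--             if char_idx == len(schematic_line) - 1:
--                 number_locations.append((number_start, char_idx + 1))
--
--         elif in_number: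
--             number_end = char_idx
--             in_number = False
--             number_locations.append((number_start, number_end))
--
--     return number_locations
--
-- def is_symbol(char: str) -> bool:
--     return (not char.isnumeric()) and (char != ".") and (char != "\n")
--
-- def location_is_part_number(
--     schematic: list[str], number_row: int, number_start: int, number_end: int
-- ) -> bool:
--     for row in range(number_row - 1, number_row + 2):
--         for col in range(number_start - 1, number_end + 1):
--             if (not 0 <= row < len(schematic)) or (not 0 <= col < len(schematic[0])):
--                 continue
--
--             try:
--                 if is_symbol(schematic[row][col]):
--                     return True
--             except IndexError:
--                 continue
--
--     return False
--
-- def get_part_number_locations_on_line(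
--     schematic: list[str], line_number: int
-- ) -> tuple[int]:
--     number_locations = get_number_locations_in_line(schematic[line_number])
--     return tuple(
--         (number_start, number_end)
--         for number_start, number_end in number_locations
--         if location_is_part_number(schematic, line_number, number_start, number_end)
--     )
-- ===== SOURCE B (Python) =====
-- def _is_sym(ch):
--     return (not ch.isnumeric()) and ch != "." and ch != "\n"
--
--
-- def get_part_number_locations_on_line(schematic, line_number):
--     line = schematic[line_number]
--     width = len(schematic[0])
--
--     # one flag per column: does the column hold a symbol in one of the three rows?
--     sym = [
--         any(
--             0 <= r < len(schematic)
--             and c < len(schematic[r])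
--             and _is_sym(schematic[r][c])
--             for r in (line_number - 1, line_number, line_number + 1)
--         )
--         for c in range(width)
--     ]
--
--     # prefix counts: prefix[k] = number of symbol columns with index < k
--     prefix = [0]
--     for flag in sym:
--         prefix.append(prefix[-1] + flag)
--
--     # stateless boundary detection of digit runs via shifted zips
--     flags = [ch.isnumeric() for ch in line]
--     starts = [
--         i for i, (f, pf) in enumerate(zip(flags, [False] + flags)) if f and not pf
--     ]
--     ends = [
--         i + 1
--         for i, (f, nf) in enumerate(zip(flags, flags[1:] + [False]))
--         if f and not nf
--     ]
--
--     result = []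
--     for a, b in zip(starts, ends):
--         lo = min(max(a - 1, 0), width)
--         hi = min(b + 1, width)
--         if prefix[hi] > prefix[lo]:
--             result.append((a, b))
--     return tuple(result)
-- ===== Notes on version B (the rewrite author's own statement) =====
-- stated objective: alternative
-- what changed: B precomputes one boolean per column (symbol in any of the three rows) and its prefix counts, answering each span's adjacency with an O(1) prefix-count range query instead of A's per-span rescan of the 3-row neighbourhood with try/except, and finds digit runs by stateless boundary detection (zipping each position's flag with its shifted neighbours and pairing starts with ends) instead of A's stateful in_number scan.
import Mathlib
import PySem

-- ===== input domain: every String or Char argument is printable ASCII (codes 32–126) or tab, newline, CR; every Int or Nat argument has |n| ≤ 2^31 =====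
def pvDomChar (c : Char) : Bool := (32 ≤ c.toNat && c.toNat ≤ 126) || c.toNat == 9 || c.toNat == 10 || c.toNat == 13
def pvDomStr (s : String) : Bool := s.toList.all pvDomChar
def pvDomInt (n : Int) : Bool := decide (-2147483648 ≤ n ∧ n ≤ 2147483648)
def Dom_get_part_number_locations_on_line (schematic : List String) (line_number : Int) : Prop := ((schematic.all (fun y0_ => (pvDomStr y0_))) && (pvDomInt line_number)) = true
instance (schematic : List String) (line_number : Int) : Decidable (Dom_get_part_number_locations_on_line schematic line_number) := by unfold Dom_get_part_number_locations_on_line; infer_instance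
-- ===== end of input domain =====

-- B replaces A's per-span rescan of the 3×(span+2) neighbourhood by one prefix-count array over
-- columns (an O(1) range-emptiness query per span) and finds digit runs by stateless boundary
-- detection (shifted zips) instead of A's stateful flag scan (objective: alternative).

-- ===== PORT A =====
-- char.isnumeric() is ported as PySem.Chars.isdigit: exact on the ASCII domain Dom_.
def is_symbol (c : Char) : Bool :=
  !(PySem.Chars.isdigit c) && !(c == '.') && !(c == '\n')

-- loop state is (number_locations, in_number, number_start); Python's initial
-- number_start = None is represented by 0, which A never reads while in_number is false.
def get_number_locations_in_line (schematic_line : String) : List (Int × Int) :=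
  (((PySem.List.enumerate schematic_line.toList 0).foldl
    (fun st p =>
      if PySem.Chars.isdigit p.2 then
        let st1 := if !st.2.1 then (st.1, true, p.1) else st
        if p.1 == (schematic_line.toList.length : Int) - 1 then
          (st1.1 ++ [(st1.2.2, p.1 + 1)], st1.2)
        else st1
      else if st.2.1 then (st.1 ++ [(st.2.2, p.1)], false, st.2.2)
      else st)
    (([] : List (Int × Int)), false, (0 : Int)))).1

-- nested for with early return True → nested any; the try/except IndexError is the none case of pyGet?.
def location_is_part_number (schematic : List String) (number_row number_start number_end : Int) : Bool :=
  (PySem.List.pyRange (number_row - 1) (number_row + 2) 1).any fun row =>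
    (PySem.List.pyRange (number_start - 1) (number_end + 1) 1).any fun col =>
      if !(decide (0 ≤ row) && decide (row < (schematic.length : Int))) ||
         !(decide (0 ≤ col) && decide (col < PySem.Str.len (PySem.List.pyGetD schematic 0 ""))) then
        false
      else
        match PySem.List.pyGet? (PySem.List.pyGetD schematic row "").toList col with
        | none => false
        | some c => is_symbol c

def get_part_number_locations_on_line (schematic : List String) (line_number : Int) : List (Int × Int) :=
  let number_locations := get_number_locations_in_line ((PySem.List.pyGet? schematic line_number).getD "")
  number_locations.filter fun p => location_is_part_number schematic line_number p.1 p.2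

-- ===== PORT B =====
def pvIsSym (c : Char) : Bool :=
  !(PySem.Chars.isdigit c) && !(c == '.') && !(c == '\n')

def get_part_number_locations_on_line_alt (schematic : List String) (line_number : Int) : List (Int × Int) :=
  let line := ((PySem.List.pyGet? schematic line_number).getD "").toList
  let width : Int := PySem.Str.len (PySem.List.pyGetD schematic 0 "")
  -- one flag per column: does the column hold a symbol in one of the three rows?
  let sym : List Bool := (PySem.List.pyRange 0 width 1).map fun c =>
    [line_number - 1, line_number, line_number + 1].any fun r =>
      decide (0 ≤ r) && decide (r < (schematic.length : Int)) &&
      decide (c < PySem.Str.len (PySem.List.pyGetD schematic r "")) &&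
      pvIsSym (PySem.List.pyGetD (PySem.List.pyGetD schematic r "").toList c ' ')
  -- pref counts: pref[k] = number of symbol columns with index < k
  let pref : List Int := sym.foldl
    (fun acc f => acc ++ [PySem.List.pyGetD acc (-1) 0 + (if f then 1 else 0)]) [0]
  -- stateless boundary detection of digit runs via shifted zips
  let flags : List Bool := line.map PySem.Chars.isdigit
  let starts : List Int := (PySem.List.enumerate (flags.zip (false :: flags)) 0).filterMap
    fun x => if x.2.1 && !x.2.2 then some x.1 else none
  let ends : List Int := (PySem.List.enumerate (flags.zip (flags.drop 1 ++ [false])) 0).filterMap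
    fun x => if x.2.1 && !x.2.2 then some (x.1 + 1) else none
  (starts.zip ends).filter fun p =>
    decide (PySem.List.pyGetD pref (min (max (p.1 - 1) 0) width) 0 <
            PySem.List.pyGetD pref (min (p.2 + 1) width) 0)

-- ===== PRECONDITION & SPEC =====
-- Pre_ excludes exactly the inputs where A raises IndexError on schematic[line_number].
def Pre_get_part_number_locations_on_line (schematic : List String) (line_number : Int) : Prop :=
  PySem.Raise.InRange schematic.length line_number
instance (schematic : List String) (line_number : Int) : Decidable (Pre_get_part_number_locations_on_line schematic line_number) := by unfold Pre_get_part_number_locations_on_line; infer_instance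

def pvWitness_get_part_number_locations_on_line : List String × Int := (["467..114..", "...*......"], 0)

def Spec_get_part_number_locations_on_line (schematic : List String) (line_number : Int) (out : List (Int × Int)) : Prop := out = get_part_number_locations_on_line_alt schematic line_number
instance (schematic : List String) (line_number : Int) (out : List (Int × Int)) : Decidable (Spec_get_part_number_locations_on_line schematic line_number out) := by unfold Spec_get_part_number_locations_on_line; infer_instance

-- ===== CLAIM (what is proved, stated in full; the proofs are below) =====
def Claim_equal_get_part_number_locations_on_line : Prop := ∀ (schematic : List String) (line_number : Int), Dom_get_part_number_locations_on_line schematic line_number → Pre_get_part_number_locations_on_line schematic line_number → Spec_get_part_number_locations_on_line schematic line_number (get_part_number_locations_on_line schematic line_number)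

-- ===== LEMMAS AND PROOFS =====

-- reference form of A's span scan
def pvGo : List Char → Int → Option Int → List (Int × Int)
  | [], _, none => []
  | [], i, some s => [(s, i)]
  | c :: cs, i, st =>
    if PySem.Chars.isdigit c then pvGo cs (i + 1) (some (st.getD i))
    else
      match st with
      | some s => (s, i) :: pvGo cs (i + 1) none
      | none => pvGo cs (i + 1) none

theorem pvA_fold (cs : List Char) : ∀ (i : Int) (locs : List (Int × Int)) (st : Option Int) (b : Bool) (s : Int) (L : Int),
    i + cs.length = L → b = st.isSome → (∀ v, st = some v → s = v) → (st = none ∨ cs ≠ []) →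
    ((PySem.List.enumerate cs i).foldl
      (fun st p =>
        if PySem.Chars.isdigit p.2 then
          let st1 := if !st.2.1 then (st.1, true, p.1) else st
          if p.1 == L - 1 then (st1.1 ++ [(st1.2.2, p.1 + 1)], st1.2) else st1
        else if st.2.1 then (st.1 ++ [(st.2.2, p.1)], false, st.2.2)
        else st)
      (locs, b, s)).1 = locs ++ pvGo cs i st := by
  induction cs with
  | nil =>
    intro i locs st b s L hL hb hs hne
    rcases hne with h | h
    · subst h; simp [PySem.List.enumerate_nil, pvGo]
    · exact absurd rfl h
  | cons c cs ih =>
    intro i locs st b s L hL hb hs hne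
    rw [PySem.List.enumerate_cons, List.foldl_cons]
    simp only [List.length_cons] at hL
    push_cast at hL
    by_cases hd : PySem.Chars.isdigit c
    · simp only [hd, reduceIte]
      rcases List.eq_nil_or_concat' cs with hnil | _
      · subst hnil
        simp only [List.length_nil, Int.natCast_zero] at hL
        have hi : (i == L - 1) = true := by simp; omega
        cases st with
        | none =>
          simp only [Option.isSome] at hb; subst hb
          simp [hi, PySem.List.enumerate_nil, pvGo, hd, Option.getD]
        | some v =>
          have hsv := hs v rfl; subst hsv
          simp only [Option.isSome] at hb; subst hb
          simp [hi, PySem.List.enumerate_nil, pvGo, hd, Option.getD]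
      · have hcs : cs ≠ [] := by rintro rfl; simp at *
        have hlen : 0 < cs.length := List.length_pos_of_ne_nil hcs
        have hi : (i == L - 1) = false := by simp; omega
        cases st with
        | none =>
          simp only [Option.isSome] at hb; subst hb
          simp only [Bool.not_false, hi, Bool.false_eq_true, reduceIte]
          rw [ih (i+1) locs (some i) true i L (by omega) rfl (by intro v h; injection h) (Or.inr hcs)]
          simp [pvGo, hd, Option.getD]
        | some v =>
          have hsv := hs v rfl; subst hsv
          simp only [Option.isSome] at hb; subst hb
          simp only [Bool.not_true, hi, Bool.false_eq_true, reduceIte]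
          rw [ih (i+1) locs (some s) true s L (by omega) rfl (by intro v h; injection h) (Or.inr hcs)]
          simp [pvGo, hd, Option.getD]
    · simp only [hd, Bool.false_eq_true, reduceIte]
      cases st with
      | none =>
        simp only [Option.isSome] at hb; subst hb
        simp only [Bool.false_eq_true, reduceIte]
        rw [ih (i+1) locs none false s L (by omega) rfl (by intro v h; cases h) (Or.inl rfl)]
        simp [pvGo, hd]
      | some v =>
        have hsv := hs v rfl; subst hsv
        simp only [Option.isSome] at hb; subst hb
        simp only [reduceIte]
        rw [ih (i+1) (locs ++ [(s, i)]) none false s L (by omega) rfl (by intro v h; cases h) (Or.inl rfl)]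
        simp [pvGo, hd]

theorem pvA_eq (line : String) : get_number_locations_in_line line = pvGo line.toList 0 none := by
  unfold get_number_locations_in_line
  rw [pvA_fold line.toList 0 [] none false 0 (line.toList.length : Int) (by simp) rfl
        (by intro v h; cases h) (Or.inl rfl)]
  simp

-- ----- B's boundary detection: recursive reference forms -----
def pvHeadDig : List Char → Bool
  | [] => false
  | c :: _ => PySem.Chars.isdigit c

def pvStartsOf : List Char → Int → Bool → List Int
  | [], _, _ => []
  | c :: cs, i, prev =>
    (if PySem.Chars.isdigit c && !prev then [i] else []) ++ pvStartsOf cs (i + 1) (PySem.Chars.isdigit c)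

def pvEndsOf : List Char → Int → List Int
  | [], _ => []
  | c :: cs, i =>
    (if PySem.Chars.isdigit c && !(pvHeadDig cs) then [i + 1] else []) ++ pvEndsOf cs (i + 1)

theorem pvBridgeS (cs : List Char) : ∀ (i : Int) (prev : Bool),
    (PySem.List.enumerate ((cs.map PySem.Chars.isdigit).zip (prev :: cs.map PySem.Chars.isdigit)) i).filterMap
      (fun x => if x.2.1 && !x.2.2 then some x.1 else none) = pvStartsOf cs i prev := by
  induction cs with
  | nil => intro i prev; simp [PySem.List.enumerate_nil, pvStartsOf]
  | cons c cs ih =>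
    intro i prev
    simp only [List.map_cons, List.zip_cons_cons, PySem.List.enumerate_cons, List.filterMap_cons]
    rw [ih]
    by_cases h : PySem.Chars.isdigit c && !prev <;> simp [pvStartsOf, h]

theorem pvBridgeE (cs : List Char) : ∀ (i : Int),
    (PySem.List.enumerate ((cs.map PySem.Chars.isdigit).zip ((cs.map PySem.Chars.isdigit).drop 1 ++ [false])) i).filterMap
      (fun x => if x.2.1 && !x.2.2 then some (x.1 + 1) else none) = pvEndsOf cs i := by
  induction cs with
  | nil => intro i; simp [PySem.List.enumerate_nil, pvEndsOf]
  | cons c cs ih =>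
    intro i
    have hz : ((c :: cs).map PySem.Chars.isdigit).zip (((c :: cs).map PySem.Chars.isdigit).drop 1 ++ [false])
        = (PySem.Chars.isdigit c, pvHeadDig cs) :: ((cs.map PySem.Chars.isdigit).zip ((cs.map PySem.Chars.isdigit).drop 1 ++ [false])) := by
      cases cs <;> simp [pvHeadDig]
    rw [hz]
    simp only [PySem.List.enumerate_cons, List.filterMap_cons]
    rw [ih]
    by_cases h : PySem.Chars.isdigit c && !(pvHeadDig cs) <;> simp [pvEndsOf, h]


theorem pvCore (cs : List Char) : ∀ (i : Int),
    ((pvStartsOf cs i false).zip (pvEndsOf cs i) = pvGo cs i none) ∧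
    (∀ s, pvGo cs i (some s) =
      if pvHeadDig cs then (s :: pvStartsOf cs i true).zip (pvEndsOf cs i)
      else (s, i) :: (pvStartsOf cs i true).zip (pvEndsOf cs i)) := by
  induction cs with
  | nil =>
    intro i
    refine ⟨by simp [pvStartsOf, pvEndsOf, pvGo], fun s => ?_⟩
    simp [pvStartsOf, pvEndsOf, pvGo, pvHeadDig]
  | cons c cs ih =>
    intro i
    have hcons : pvHeadDig (c :: cs) = PySem.Chars.isdigit c := rfl
    by_cases hd : PySem.Chars.isdigit c
    · constructor
      · simp only [pvStartsOf, pvEndsOf, pvGo, hd, Bool.not_false, Bool.and_true, if_true,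
          List.cons_append, List.nil_append, Option.getD]
        rw [(ih (i + 1)).2 i]
        by_cases hh : pvHeadDig cs <;> simp [hh]
      · intro s
        rw [hcons, if_pos hd]
        simp only [pvStartsOf, pvEndsOf, pvGo, hd, Bool.not_true, Bool.and_false, if_true,
          Option.getD]
        rw [(ih (i + 1)).2 s]
        by_cases hh : pvHeadDig cs <;> simp [hh]
    · constructor
      · simp only [pvStartsOf, pvEndsOf, pvGo, hd, Bool.false_and, Bool.false_eq_true, if_false,
          List.nil_append]
        exact (ih (i + 1)).1
      · intro s
        rw [hcons, if_neg hd]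
        simp only [pvStartsOf, pvEndsOf, pvGo, hd, Bool.false_and, Bool.false_eq_true, if_false,
          List.nil_append]
        rw [(ih (i + 1)).1]

-- ----- prefix counts -----
def pvPS (s : Int) : List Bool → List Int
  | [] => []
  | f :: fs => (s + (if f then 1 else 0)) :: pvPS (s + (if f then 1 else 0)) fs

theorem pvPrefix_fold (sym : List Bool) : ∀ (pre : List Int) (s : Int),
    sym.foldl (fun acc f => acc ++ [PySem.List.pyGetD acc (-1) 0 + (if f then 1 else 0)]) (pre ++ [s])
      = pre ++ s :: pvPS s sym := by
  induction sym with
  | nil => intro pre s; simp [pvPS]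
  | cons f fs ih =>
    intro pre s
    rw [List.foldl_cons, PySem.List.pyGetD_neg_one_append_singleton]
    rw [ih (pre ++ [s]) (s + (if f then 1 else 0))]
    simp [pvPS]

theorem pvPS_getD (sym : List Bool) : ∀ (s : Int) (k : Nat), k ≤ sym.length →
    (s :: pvPS s sym).getD k 0 = s + (((sym.take k).countP id : Nat) : Int) := by
  induction sym with
  | nil =>
    intro s k hk
    have : k = 0 := by simpa using hk
    subst this; simp
  | cons f fs ih =>
    intro s k hk
    cases k with
    | zero => simp
    | succ k =>
      simp only [pvPS, List.getD_cons_succ, List.take_succ_cons, List.countP_cons]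
      rw [ih (s + (if f then 1 else 0)) k (by simpa using hk)]
      by_cases hf : f
      · simp [hf]
        ring
      · simp [hf]

theorem pvCount_segment (sym : List Bool) (lo hi : Nat) :
    ((((sym.take lo).countP id : Nat) : Int) < (((sym.take hi).countP id : Nat) : Int)) ↔
      ∃ k : Nat, lo ≤ k ∧ k < hi ∧ ∃ h : k < sym.length, sym[k] = true := by
  by_cases hle : hi ≤ lo
  · have hsub : (sym.take hi).countP id ≤ (sym.take lo).countP id := by
      have : sym.take hi = (sym.take lo).take hi := by
        rw [List.take_take, Nat.min_eq_left hle]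
      rw [this]
      exact (List.take_sublist _ _).countP_le
    constructor
    · intro h; omega
    · rintro ⟨k, h1, h2, _⟩; omega
  · rw [not_le] at hle
    have hdecomp : sym.take hi = sym.take lo ++ (sym.drop lo).take (hi - lo) := by
      rw [← List.take_add]
      congr 1
      omega
    rw [hdecomp, List.countP_append]
    have hpos : ((((sym.take lo).countP id : Nat) : Int) < (((sym.take lo).countP id + ((sym.drop lo).take (hi - lo)).countP id : Nat) : Int)) ↔ 0 < ((sym.drop lo).take (hi - lo)).countP id := by
      push_cast; omega
    rw [hpos, List.countP_pos_iff]
    constructor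
    · rintro ⟨x, hmem, hx⟩
      obtain ⟨n, hn, hget⟩ := List.mem_iff_getElem.mp hmem
      have hn' : n < hi - lo := by
        have := hn
        simp [List.length_take, List.length_drop] at this
        omega
      have hlen : lo + n < sym.length := by
        have := hn
        simp [List.length_take, List.length_drop] at this
        omega
      refine ⟨lo + n, by omega, by omega, hlen, ?_⟩
      have : ((sym.drop lo).take (hi - lo))[n] = sym[lo + n] := by
        rw [List.getElem_take, List.getElem_drop]
      simp only [id] at hx
      rw [← this, hget, hx]
    · rintro ⟨k, h1, h2, hlen, hval⟩
      refine ⟨true, ?_, rfl⟩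
      rw [List.mem_iff_getElem]
      have hn : k - lo < ((sym.drop lo).take (hi - lo)).length := by
        simp [List.length_take, List.length_drop]
        omega
      refine ⟨k - lo, hn, ?_⟩
      have : ((sym.drop lo).take (hi - lo))[k - lo] = sym[lo + (k - lo)] := by
        rw [List.getElem_take, List.getElem_drop]
      rw [this]
      have hk : lo + (k - lo) = k := by omega
      simp only [hk]
      exact hval

theorem pvGet_split (xs : List Char) (c : Int) (hc : 0 ≤ c) :
    PySem.List.pyGet? xs c = (if c < (xs.length:Int) then some (PySem.List.pyGetD xs c ' ') else none) := by
  simp only [PySem.List.pyGet?, PySem.List.pyIdx?, PySem.List.pyGetD]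
  split_ifs <;> simp_all

-- spans produced by the scan have nonnegative starts and start < end
theorem pvGo_bounds (cs : List Char) : ∀ (i : Int) (st : Option Int), 0 ≤ i →
    (∀ s, st = some s → 0 ≤ s ∧ s < i) → ∀ p ∈ pvGo cs i st, 0 ≤ p.1 ∧ p.1 < p.2 := by
  induction cs with
  | nil =>
    intro i st h0 hst p hp
    cases st with
    | none => simp [pvGo] at hp
    | some s =>
      simp [pvGo] at hp
      obtain ⟨h1, h2⟩ := hst s rfl
      subst hp
      exact ⟨h1, h2⟩
  | cons c cs ih =>
    intro i st h0 hst p hp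
    by_cases hd : PySem.Chars.isdigit c
    · simp only [pvGo, hd, if_pos] at hp
      refine ih (i + 1) (some (st.getD i)) (by omega) ?_ p hp
      intro s hs
      cases st with
      | none => simp at hs; omega
      | some v => simp at hs; have := hst v rfl; omega
    · cases st with
      | none =>
        simp only [pvGo, hd, Bool.false_eq_true, if_false] at hp
        exact ih (i + 1) none (by omega) (by intro s hs; cases hs) p hp
      | some v =>
        simp only [pvGo, hd, Bool.false_eq_true, if_false] at hp
        rcases List.mem_cons.mp hp with h | h
        · subst h; exact (hst v rfl).imp id (fun h2 => h2)
        · exact ih (i + 1) none (by omega) (by intro s hs; cases hs) p h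

-- proof-side names for the pieces of B's port (definitionally the port's expressions)
def pvW (schematic : List String) : Int := PySem.Str.len (PySem.List.pyGetD schematic 0 "")

def pvF (schematic : List String) (line_number : Int) (c : Int) : Bool :=
  [line_number - 1, line_number, line_number + 1].any fun r =>
    decide (0 ≤ r) && decide (r < (schematic.length : Int)) &&
    decide (c < PySem.Str.len (PySem.List.pyGetD schematic r "")) &&
    pvIsSym (PySem.List.pyGetD (PySem.List.pyGetD schematic r "").toList c ' ')

def pvSymL (schematic : List String) (line_number : Int) : List Bool :=
  (PySem.List.pyRange 0 (pvW schematic) 1).map (pvF schematic line_number)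

def pvPref (schematic : List String) (line_number : Int) : List Int :=
  (pvSymL schematic line_number).foldl
    (fun acc f => acc ++ [PySem.List.pyGetD acc (-1) 0 + (if f then 1 else 0)]) [0]

theorem pvA_iff (schematic : List String) (l a b : Int) :
    location_is_part_number schematic l a b = true ↔
      ∃ c r : Int, (l - 1 ≤ r ∧ r < l + 2) ∧ (a - 1 ≤ c ∧ c < b + 1) ∧
        0 ≤ r ∧ r < (schematic.length : Int) ∧ 0 ≤ c ∧ c < pvW schematic ∧
        c < PySem.Str.len (PySem.List.pyGetD schematic r "") ∧
        is_symbol (PySem.List.pyGetD (PySem.List.pyGetD schematic r "").toList c ' ') = true := by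
  unfold location_is_part_number
  simp only [List.any_eq_true, PySem.List.mem_pyRange_one]
  have hinner : ∀ r c : Int,
      ((if !(decide (0 ≤ r) && decide (r < (schematic.length : Int))) ||
           !(decide (0 ≤ c) && decide (c < PySem.Str.len (PySem.List.pyGetD schematic 0 ""))) then
          false
        else
          match PySem.List.pyGet? (PySem.List.pyGetD schematic r "").toList c with
          | none => false
          | some ch => is_symbol ch) = true) ↔
      (0 ≤ r ∧ r < (schematic.length : Int) ∧ 0 ≤ c ∧ c < pvW schematic ∧
        c < PySem.Str.len (PySem.List.pyGetD schematic r "") ∧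
        is_symbol (PySem.List.pyGetD (PySem.List.pyGetD schematic r "").toList c ' ') = true) := by
    intro r c
    by_cases hg : (0 ≤ r ∧ r < (schematic.length : Int)) ∧ 0 ≤ c ∧ c < pvW schematic
    · obtain ⟨⟨h1, h2⟩, h3, h4⟩ := hg
      have hcond : (!(decide (0 ≤ r) && decide (r < (schematic.length : Int))) ||
          !(decide (0 ≤ c) && decide (c < PySem.Str.len (PySem.List.pyGetD schematic 0 "")))) = false := by
        simp only [Bool.or_eq_false_iff, Bool.not_eq_false', Bool.and_eq_true, decide_eq_true_eq]
        exact ⟨⟨h1, h2⟩, h3, h4⟩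
      rw [hcond, if_neg (by simp), pvGet_split _ _ h3]
      by_cases h5 : c < (((PySem.List.pyGetD schematic r "").toList.length : Nat) : Int)
      · rw [if_pos h5]
        have h5' : c < PySem.Str.len (PySem.List.pyGetD schematic r "") := by
          rw [PySem.Str.len_eq]; exact h5
        exact ⟨fun h => ⟨h1, h2, h3, h4, h5', h⟩, fun h => h.2.2.2.2.2⟩
      · rw [if_neg h5]
        refine ⟨fun h => absurd h (by simp), fun h => absurd h.2.2.2.2.1 ?_⟩
        rw [PySem.Str.len_eq]
        exact h5
    · have hcond : (!(decide (0 ≤ r) && decide (r < (schematic.length : Int))) ||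
          !(decide (0 ≤ c) && decide (c < PySem.Str.len (PySem.List.pyGetD schematic 0 "")))) = true := by
        by_contra hx
        simp only [Bool.not_eq_true, Bool.or_eq_false_iff, Bool.not_eq_false', Bool.and_eq_true,
          decide_eq_true_eq] at hx
        exact hg ⟨hx.1, hx.2⟩
      rw [hcond, if_pos rfl]
      refine ⟨fun h => absurd h (by simp), fun h => absurd ⟨⟨h.1, h.2.1⟩, h.2.2.1, h.2.2.2.1⟩ hg⟩
  simp only [hinner]
  constructor
  · rintro ⟨r, hr, c, hc, h⟩
    exact ⟨c, r, hr, hc, h.1, h.2.1, h.2.2.1, h.2.2.2.1, h.2.2.2.2.1, h.2.2.2.2.2⟩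
  · rintro ⟨c, r, hr, hc, h1, h2, h3, h4, h5, h6⟩
    exact ⟨r, hr, c, hc, h1, h2, h3, h4, h5, h6⟩

-- per-span: A's neighbourhood rescan equals B's prefix-count range query
theorem pvCond_eq (schematic : List String) (line_number a b : Int) (ha : 0 ≤ a) (hab : a < b) :
    location_is_part_number schematic line_number a b =
      (let width : Int := PySem.Str.len (PySem.List.pyGetD schematic 0 "")
       let sym : List Bool := (PySem.List.pyRange 0 width 1).map fun c =>
         [line_number - 1, line_number, line_number + 1].any fun r =>
           decide (0 ≤ r) && decide (r < (schematic.length : Int)) &&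
           decide (c < PySem.Str.len (PySem.List.pyGetD schematic r "")) &&
           pvIsSym (PySem.List.pyGetD (PySem.List.pyGetD schematic r "").toList c ' ')
       let pref : List Int := sym.foldl
         (fun acc f => acc ++ [PySem.List.pyGetD acc (-1) 0 + (if f then 1 else 0)]) [0]
       decide (PySem.List.pyGetD pref (min (max (a - 1) 0) width) 0 <
               PySem.List.pyGetD pref (min (b + 1) width) 0)) := by
  show location_is_part_number schematic line_number a b =
      decide (PySem.List.pyGetD (pvPref schematic line_number) (min (max (a - 1) 0) (pvW schematic)) 0 <
              PySem.List.pyGetD (pvPref schematic line_number) (min (b + 1) (pvW schematic)) 0)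
  have hw0 : 0 ≤ pvW schematic := by unfold pvW; rw [PySem.Str.len_eq]; positivity
  have hlen : (pvSymL schematic line_number).length = (pvW schematic).toNat := by
    unfold pvSymL
    rw [List.length_map, PySem.List.length_pyRange_one]
    omega
  have hpref : pvPref schematic line_number = 0 :: pvPS 0 (pvSymL schematic line_number) := by
    unfold pvPref
    simpa using pvPrefix_fold (pvSymL schematic line_number) [] 0
  set lo : Int := min (max (a - 1) 0) (pvW schematic) with hlo_def
  set hi : Int := min (b + 1) (pvW schematic) with hhi_def
  have hlo0 : 0 ≤ lo := by omega
  have hlow : lo ≤ pvW schematic := by omega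
  have hhi0 : 0 ≤ hi := by omega
  have hhiw : hi ≤ pvW schematic := by omega
  have hgetlo : PySem.List.pyGetD (pvPref schematic line_number) lo 0 =
      (((pvSymL schematic line_number).take lo.toNat).countP id : Nat) := by
    rw [hpref, show lo = ((lo.toNat : Nat) : Int) from (Int.toNat_of_nonneg hlo0).symm,
      PySem.List.pyGetD_natCast]
    rw [pvPS_getD _ _ _ (by omega)]
    simp
    rw [show max lo 0 = lo from by omega]
  have hgethi : PySem.List.pyGetD (pvPref schematic line_number) hi 0 =
      (((pvSymL schematic line_number).take hi.toNat).countP id : Nat) := by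
    rw [hpref, show hi = ((hi.toNat : Nat) : Int) from (Int.toNat_of_nonneg hhi0).symm,
      PySem.List.pyGetD_natCast]
    rw [pvPS_getD _ _ _ (by omega)]
    simp
    rw [show max hi 0 = hi from by omega]
  rw [Bool.eq_iff_iff, pvA_iff, hgetlo, hgethi, decide_eq_true_eq,
    pvCount_segment (pvSymL schematic line_number) lo.toNat hi.toNat]
  constructor
  · rintro ⟨c, r, hr, hc, hr0, hr1, hc0, hc1, hclen, hsym⟩
    refine ⟨c.toNat, by omega, by omega, by omega, ?_⟩
    unfold pvSymL
    rw [List.getElem_map, PySem.List.getElem_pyRange_one]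
    have hcast : (0 : Int) + (c.toNat : Int) = c := by omega
    rw [hcast]
    unfold pvF
    simp only [List.any_cons, List.any_nil, Bool.or_false, Bool.or_eq_true, Bool.and_eq_true,
      decide_eq_true_eq]
    have hone : r = line_number - 1 ∨ r = line_number ∨ r = line_number + 1 := by omega
    rcases hone with h | h | h <;> subst h
    · exact Or.inl ⟨⟨⟨hr0, hr1⟩, hclen⟩, hsym⟩
    · exact Or.inr (Or.inl ⟨⟨⟨hr0, hr1⟩, hclen⟩, hsym⟩)
    · exact Or.inr (Or.inr ⟨⟨⟨hr0, hr1⟩, hclen⟩, hsym⟩)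
  · rintro ⟨k, hk1, hk2, hk3, hval⟩
    unfold pvSymL at hval
    rw [List.getElem_map, PySem.List.getElem_pyRange_one] at hval
    unfold pvF at hval
    simp only [List.any_cons, List.any_nil, Bool.or_false, Bool.or_eq_true, Bool.and_eq_true,
      decide_eq_true_eq] at hval
    have hkw : (k : Int) < pvW schematic := by
      rw [hlen] at hk3; omega
    rcases hval with ⟨⟨⟨h1, h2⟩, h3⟩, h4⟩ | ⟨⟨⟨h1, h2⟩, h3⟩, h4⟩ | ⟨⟨⟨h1, h2⟩, h3⟩, h4⟩
    · exact ⟨0 + (k : Int), line_number - 1, by omega, by omega, h1, h2, by omega, by omega, h3, h4⟩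
    · exact ⟨0 + (k : Int), line_number, by omega, by omega, h1, h2, by omega, by omega, h3, h4⟩
    · exact ⟨0 + (k : Int), line_number + 1, by omega, by omega, h1, h2, by omega, by omega, h3, h4⟩

-- ===== VERDICT (by name: the statement is the Claim_ definition above) =====
theorem get_part_number_locations_on_line_spec : Claim_equal_get_part_number_locations_on_line := by
  intro schematic line_number _hDom _hPre
  unfold Spec_get_part_number_locations_on_line
  unfold get_part_number_locations_on_line get_part_number_locations_on_line_alt
  simp only [pvA_eq, pvBridgeS, pvBridgeE]
  rw [(pvCore _ _).1]
  refine List.filter_congr (fun p hp => ?_)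
  have hb := pvGo_bounds _ 0 none le_rfl (by intro s hs; cases hs) p hp
  exact pvCond_eq schematic line_number p.1 p.2 hb.1 hb.2
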